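-- pv_equiv track=rewrite | github.com/ruifi47/CTF-solves | 2024/H7CTF-International/reverse/scrambled_pathways/solve.py | reverse_transformation
-- ===== SOURCE A (Python) =====
-- def reverse_transformation(output):
--     part_len = (len(output) + 2) // 3
--
--     part1 = output[:part_len]
--     part2 = output[part_len:2 * part_len]
--     part3 = output[2 * part_len:]
--
--     input = []
--
--     for i in range(part_len):
--         if i < len(part1):
--             input.append(part1[i])
--         if i < len(part2):
--             input.append(part2[i])
--         if i < len(part3):
--             input.append(part3[i])
--
--     return ''.join(input)
-- ===== SOURCE B (Python) =====
-- def reverse_transformation(output):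
--     n = len(output)
--     p = (n + 2) // 3
--     b = min(p, n - p)
--     c = max(n - 2 * p, 0)
--
--     def src(k):
--         if k < 3 * c:
--             return (k % 3) * p + k // 3
--         j = k - 3 * c
--         if j < 2 * (b - c):
--             return (j % 2) * p + c + j // 2
--         return b + (j - 2 * (b - c))
--
--     return ''.join(output[src(k)] for k in range(n))
-- ===== Notes on version B (the rewrite author's own statement) =====
-- stated objective: alternative
-- what changed: B drops the three-way split-and-interleave loop and instead computes, for each output position, the source index directly via a closed-form piecewise position map applied in a single pass over range(len(output)).
import Mathlib
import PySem

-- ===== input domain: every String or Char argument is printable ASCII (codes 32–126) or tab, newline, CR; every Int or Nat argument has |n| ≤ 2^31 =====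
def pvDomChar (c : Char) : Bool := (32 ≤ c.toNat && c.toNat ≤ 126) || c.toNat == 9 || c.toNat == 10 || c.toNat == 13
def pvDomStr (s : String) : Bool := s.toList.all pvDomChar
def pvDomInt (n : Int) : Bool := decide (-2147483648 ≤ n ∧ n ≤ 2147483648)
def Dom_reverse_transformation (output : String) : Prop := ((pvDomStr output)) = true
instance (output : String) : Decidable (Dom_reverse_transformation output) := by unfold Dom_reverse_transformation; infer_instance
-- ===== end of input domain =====

-- B replaces "slice into three parts, then interleave with index guards" by a direct
-- closed-form source-position map over a single pass (objective: alternative algorithm, similar cost).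


-- ===== PORT A =====
def reverse_transformation (output : String) : String :=
  let chars := output.toList
  let part_len : Int := PySem.Int.floordiv ((chars.length : Int) + 2) 3
  let part1 := PySem.List.slice chars none (some part_len)
  let part2 := PySem.List.slice chars (some part_len) (some (2 * part_len))
  let part3 := PySem.List.slice chars (some (2 * part_len)) none
  let input := (PySem.List.pyRange 0 part_len 1).foldl (fun acc i =>
      let acc1 := if i < (part1.length : Int) then acc ++ (PySem.List.pyGet? part1 i).toList else acc
      let acc2 := if i < (part2.length : Int) then acc1 ++ (PySem.List.pyGet? part2 i).toList else acc1
      if i < (part3.length : Int) then acc2 ++ (PySem.List.pyGet? part3 i).toList else acc2)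
    ([] : List Char)
  String.ofList input

-- ===== PORT B =====
-- the closed-form source index of Source B's `src`
def pvSrc (p b c k : Int) : Int :=
  if k < 3 * c then PySem.Int.mod k 3 * p + PySem.Int.floordiv k 3
  else
    let j := k - 3 * c
    if j < 2 * (b - c) then PySem.Int.mod j 2 * p + c + PySem.Int.floordiv j 2
    else b + (j - 2 * (b - c))

def reverse_transformation_alt (output : String) : String :=
  let chars := output.toList
  let n : Int := chars.length
  let p := PySem.Int.floordiv (n + 2) 3
  let b := min p (n - p)
  let c := max (n - 2 * p) 0
  String.ofList ((PySem.List.pyRange 0 n 1).filterMap (fun k => PySem.List.pyGet? chars (pvSrc p b c k)))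

-- ===== PRECONDITION & SPEC =====
def Spec_reverse_transformation (output : String) (out : String) : Prop := out = reverse_transformation_alt output
instance (output : String) (out : String) : Decidable (Spec_reverse_transformation output out) := by unfold Spec_reverse_transformation; infer_instance

-- ===== CLAIM (what is proved, stated in full; the proofs are below) =====
def Claim_equal_reverse_transformation : Prop := ∀ (output : String), Dom_reverse_transformation output → Spec_reverse_transformation output (reverse_transformation output)

-- ===== LEMMAS AND PROOFS =====

-- default-valued element access used by the proof's normal form
def pvE (L : List Char) (i : Nat) : Char := L.getD i ' '

-- common normal form: triples chunk ++ pairs chunk ++ singles chunk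
def pvChunks (L : List Char) (p b c : Nat) : List Char :=
  (List.range c).flatMap (fun i => [pvE L i, pvE L (p + i), pvE L (2 * p + i)])
    ++ ((List.range (b - c)).flatMap (fun j => [pvE L (c + j), pvE L (p + c + j)])
      ++ (List.range (p - b)).map (fun j => pvE L (b + j)))

-- Nat-level version of Source B's src
def srcN (p b c k : Nat) : Nat :=
  if k < 3 * c then k % 3 * p + k / 3
  else if k - 3 * c < 2 * (b - c) then (k - 3 * c) % 2 * p + c + (k - 3 * c) / 2
  else b + (k - 3 * c - 2 * (b - c))

theorem pvSrc_natCast (p b c k : Nat) (hcb : c ≤ b) :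
    pvSrc (p : Int) (b : Int) (c : Int) (k : Int) = ((srcN p b c k : Nat) : Int) := by
  simp only [pvSrc, srcN,
    PySem.Int.floordiv_eq_ediv_of_pos (b := 3) (by norm_num),
    PySem.Int.floordiv_eq_ediv_of_pos (b := 2) (by norm_num),
    PySem.Int.mod_eq_emod_of_pos (b := 3) (by norm_num),
    PySem.Int.mod_eq_emod_of_pos (b := 2) (by norm_num)]
  by_cases h1 : k < 3 * c
  · rw [if_pos (show (k : Int) < 3 * (c : Int) by exact_mod_cast h1), if_pos h1]
    push_cast
    ring
  · rw [if_neg (show ¬ ((k : Int) < 3 * (c : Int)) by exact_mod_cast h1), if_neg h1]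
    rw [show (k : Int) - 3 * (c : Int) = ((k - 3 * c : Nat) : Int) by omega]
    by_cases h2 : k - 3 * c < 2 * (b - c)
    · rw [if_pos (show ((k - 3 * c : Nat) : Int) < 2 * ((b : Int) - (c : Int)) by omega), if_pos h2]
      push_cast
      ring
    · rw [if_neg (show ¬ (((k - 3 * c : Nat) : Int) < 2 * ((b : Int) - (c : Int))) by omega), if_neg h2]
      omega

theorem tri_interleave {α : Type} (m : Nat) (f g h : Nat → α) :
    (List.range (3 * m)).map
      (fun k => if k % 3 = 0 then f (k / 3) else if k % 3 = 1 then g (k / 3) else h (k / 3))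
      = (List.range m).flatMap (fun i => [f i, g i, h i]) := by
  induction m with
  | zero => simp
  | succ m ih =>
    have e : 3 * (m + 1) = 3 * m + 1 + 1 + 1 := by ring
    rw [e, List.range_succ, List.range_succ, List.range_succ, List.range_succ,
        List.map_append, List.map_append, List.map_append, List.flatMap_append, ← ih]
    have h0 : (3 * m) % 3 = 0 := by omega
    have h1 : (3 * m + 1) % 3 = 1 := by omega
    have h2 : (3 * m + 1 + 1) % 3 = 2 := by omega
    have d0 : (3 * m) / 3 = m := by omega
    have d1 : (3 * m + 1) / 3 = m := by omega
    have d2 : (3 * m + 1 + 1) / 3 = m := by omega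
    simp [h0, h1, h2, d0, d1, d2]

theorem pair_interleave {α : Type} (m : Nat) (f g : Nat → α) :
    (List.range (2 * m)).map (fun k => if k % 2 = 0 then f (k / 2) else g (k / 2))
      = (List.range m).flatMap (fun i => [f i, g i]) := by
  induction m with
  | zero => simp
  | succ m ih =>
    have e : 2 * (m + 1) = 2 * m + 1 + 1 := by ring
    rw [e, List.range_succ, List.range_succ, List.range_succ,
        List.map_append, List.map_append, List.flatMap_append, ← ih]
    have h0 : (2 * m) % 2 = 0 := by omega
    have h1 : (2 * m + 1) % 2 = 1 := by omega
    have d0 : (2 * m) / 2 = m := by omega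
    have d1 : (2 * m + 1) / 2 = m := by omega
    simp [h0, h1, d0, d1]

-- the closed-form position map, mapped over range n, equals the three chunks
theorem map_src_eq_chunks (L : List Char) (p b c : Nat) (hbp : b ≤ p) (hcb : c ≤ b)
    (hn : L.length = p + b + c) :
    (List.range L.length).map (fun k => pvE L (srcN p b c k)) = pvChunks L p b c := by
  rw [hn, show p + b + c = 3 * c + (2 * (b - c) + (p - b)) from by omega,
      List.range_add, List.range_add, List.map_append]
  simp only [List.map_map, List.map_append]
  unfold pvChunks
  congr 1
  · -- triples
    rw [← tri_interleave c (fun i => pvE L i) (fun i => pvE L (p + i)) (fun i => pvE L (2 * p + i))]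
    apply List.map_congr_left
    intro k hk
    rw [List.mem_range] at hk
    have h3 : k % 3 = 0 ∨ k % 3 = 1 ∨ k % 3 = 2 := by omega
    unfold srcN
    rw [if_pos hk]
    rcases h3 with h | h | h <;> simp only [h] <;> norm_num
  congr 1
  · -- pairs
    rw [← pair_interleave (b - c) (fun j => pvE L (c + j)) (fun j => pvE L (p + c + j))]
    apply List.map_congr_left
    intro k hk
    rw [List.mem_range] at hk
    simp only [Function.comp_apply]
    unfold srcN
    rw [if_neg (by omega : ¬ (3 * c + k < 3 * c)),
        if_pos (by omega : 3 * c + k - 3 * c < 2 * (b - c)),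
        show 3 * c + k - 3 * c = k from by omega]
    have h2 : k % 2 = 0 ∨ k % 2 = 1 := by omega
    rcases h2 with h | h <;> simp only [h] <;> norm_num
  · -- singles
    apply List.map_congr_left
    intro k hk
    rw [List.mem_range] at hk
    simp only [Function.comp_apply]
    unfold srcN
    rw [if_neg (by omega : ¬ (3 * c + (2 * (b - c) + k) < 3 * c)),
        if_neg (by omega : ¬ (3 * c + (2 * (b - c) + k) - 3 * c < 2 * (b - c)))]
    congr 1
    omega

theorem srcN_lt (p b c k n : Nat) (hbp : b ≤ p) (hcb : c ≤ b) (hn : n = p + b + c)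
    (hpc : 0 < c → b = p) (hk : k < n) : srcN p b c k < n := by
  unfold srcN
  split_ifs with h1 h2
  · have hb := hpc (by omega)
    have h3 : k % 3 = 0 ∨ k % 3 = 1 ∨ k % 3 = 2 := by omega
    rcases h3 with h | h | h <;> rw [h] <;> omega
  · have h2' : (k - 3 * c) % 2 = 0 ∨ (k - 3 * c) % 2 = 1 := by omega
    rcases h2' with h | h <;> rw [h] <;> omega
  · omega

theorem B_norm (L : List Char) :
    reverse_transformation_alt (String.ofList L)
      = String.ofList (pvChunks L ((L.length + 2) / 3)
          (min ((L.length + 2) / 3) (L.length - (L.length + 2) / 3))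
          (L.length - 2 * ((L.length + 2) / 3))) := by
  unfold reverse_transformation_alt
  simp only [String.toList_ofList]
  rw [PySem.Int.floordiv_eq_ediv_of_pos (by norm_num)]
  have hp : ((L.length : Int) + 2) / 3 = (((L.length + 2) / 3 : Nat) : Int) := by omega
  rw [hp]
  have hb : min (((L.length + 2) / 3 : Nat) : Int) ((L.length : Int) - (((L.length + 2) / 3 : Nat) : Int))
      = ((min ((L.length + 2) / 3) (L.length - (L.length + 2) / 3) : Nat) : Int) := by omega
  have hc : max ((L.length : Int) - 2 * (((L.length + 2) / 3 : Nat) : Int)) 0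
      = ((L.length - 2 * ((L.length + 2) / 3) : Nat) : Int) := by omega
  rw [hb, hc, PySem.List.pyRange_zero_natCast, List.filterMap_map]
  congr 1
  rw [← map_src_eq_chunks L _ _ _ (by omega) (by omega) (by omega)]
  rw [← List.filterMap_eq_map]
  apply List.filterMap_congr
  intro k hk
  rw [List.mem_range] at hk
  simp only [Function.comp_apply]
  rw [pvSrc_natCast _ _ _ _ (by omega), PySem.List.pyGet?_natCast]
  have hlt : srcN ((L.length + 2) / 3) (min ((L.length + 2) / 3) (L.length - (L.length + 2) / 3))
      (L.length - 2 * ((L.length + 2) / 3)) k < L.length :=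
    srcN_lt _ _ _ _ _ (by omega) (by omega) (by omega) (fun h => by omega) hk
  rw [List.getElem?_eq_getElem hlt]
  simp [pvE, List.getD_eq_getElem?_getD, List.getElem?_eq_getElem hlt]

theorem getElem?_toList_of_lt (xs : List Char) (j : Nat) (h : j < xs.length) :
    (xs[j]?).toList = [pvE xs j] := by
  rw [List.getElem?_eq_getElem h]
  simp [pvE, List.getD_eq_getElem?_getD, List.getElem?_eq_getElem h]

theorem getElem?_toList_of_ge (xs : List Char) (j : Nat) (h : xs.length ≤ j) :
    (xs[j]?).toList = [] := by
  rw [List.getElem?_eq_none h]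
  rfl

theorem A_norm (L : List Char) :
    reverse_transformation (String.ofList L)
      = String.ofList (pvChunks L ((L.length + 2) / 3)
          (min ((L.length + 2) / 3) (L.length - (L.length + 2) / 3))
          (L.length - 2 * ((L.length + 2) / 3))) := by
  unfold reverse_transformation
  simp only [String.toList_ofList]
  rw [PySem.Int.floordiv_eq_ediv_of_pos (by norm_num)]
  have hp : ((L.length : Int) + 2) / 3 = (((L.length + 2) / 3 : Nat) : Int) := by omega
  rw [hp]
  set n := L.length with hn
  set p := (n + 2) / 3 with hpdef
  set b := min p (n - p) with hbdef
  set c := n - 2 * p with hcdef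
  rw [PySem.List.slice_to_natCast,
      show (2 * ((p : Nat) : Int)) = ((2 * p : Nat) : Int) from by push_cast; ring,
      PySem.List.slice_natCast, PySem.List.slice_from_natCast,
      show 2 * p - p = p from by omega,
      PySem.List.pyRange_zero_natCast, List.foldl_map]
  have hbody : (fun (acc : List Char) (i : Nat) =>
      (fun (acc : List Char) (i : Int) =>
        let acc1 := if i < ((L.take p).length : Int) then acc ++ (PySem.List.pyGet? (L.take p) i).toList else acc
        let acc2 := if i < (((L.drop p).take p).length : Int) then acc1 ++ (PySem.List.pyGet? ((L.drop p).take p) i).toList else acc1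
        if i < ((L.drop (2 * p)).length : Int) then acc2 ++ (PySem.List.pyGet? (L.drop (2 * p)) i).toList else acc2) acc (i : Int))
      = fun acc i => acc ++ ((L.take p)[i]?.toList ++ (((L.drop p).take p)[i]?.toList ++ (L.drop (2 * p))[i]?.toList)) := by
    funext acc i
    have hstep : ∀ (xs acc0 : List Char),
        (if (i : Int) < (xs.length : Int) then acc0 ++ (PySem.List.pyGet? xs (i : Int)).toList else acc0)
          = acc0 ++ (xs[i]?).toList := by
      intro xs acc0
      by_cases h : i < xs.length
      · rw [if_pos (by exact_mod_cast h), PySem.List.pyGet?_natCast]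
      · rw [if_neg (by exact_mod_cast h), List.getElem?_eq_none (by omega), Option.toList_none,
            List.append_nil]
    simp only [hstep]
    simp only [List.append_assoc]
  rw [hbody, PySem.List.foldl_append_eq_flatMap, List.nil_append]
  congr 1
  unfold pvChunks
  have hrange : List.range p = List.range (c + ((b - c) + (p - b))) := by
    congr 1
    omega
  rw [hrange, List.range_add, List.range_add, List.flatMap_append, List.map_append,
      List.flatMap_append, List.flatMap_map, List.flatMap_map, List.flatMap_map]
  congr 1
  · -- triples: here 0 < c forces b = p
    apply List.flatMap_congr
    intro i hi
    rw [List.mem_range] at hi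
    have h1 : i < p := by omega
    have h2 : p + i < n := by omega
    have h3 : 2 * p + i < n := by omega
    rw [List.getElem?_take_of_lt h1, List.getElem?_take_of_lt h1, List.getElem?_drop,
        List.getElem?_drop, getElem?_toList_of_lt _ _ (by omega), getElem?_toList_of_lt _ _ (by omega),
        getElem?_toList_of_lt _ _ (by omega)]
    rfl
  congr 1
  · -- pairs
    apply List.flatMap_congr
    intro j hj
    rw [List.mem_range] at hj
    have h1 : c + j < p := by omega
    have h3 : (L.drop (2 * p)).length ≤ c + j := by simp only [List.length_drop]; omega
    rw [List.getElem?_take_of_lt h1, List.getElem?_take_of_lt h1, List.getElem?_drop,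
        getElem?_toList_of_lt _ _ (by omega), getElem?_toList_of_lt _ _ (by omega),
        getElem?_toList_of_ge _ _ h3, List.append_nil]
    rw [show p + (c + j) = p + c + j from by omega]
    rfl
  · -- singles
    rw [show (List.range (p - b)).map (fun j => pvE L (b + j))
        = (List.range (p - b)).flatMap (fun j => [pvE L (b + j)]) from by
      rw [List.map_eq_flatMap]]
    apply List.flatMap_congr
    intro j hj
    rw [List.mem_range] at hj
    have h1 : c + (b - c + j) < p := by omega
    have h2 : ((L.drop p).take p).length ≤ c + (b - c + j) := by simp only [List.length_take, List.length_drop]; omega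
    have h3 : (L.drop (2 * p)).length ≤ c + (b - c + j) := by simp only [List.length_drop]; omega
    rw [List.getElem?_take_of_lt h1, getElem?_toList_of_lt _ _ (by omega),
        getElem?_toList_of_ge _ _ h2, getElem?_toList_of_ge _ _ h3, List.append_nil,
        List.append_nil]
    rw [show c + (b - c + j) = b + j from by omega]

-- ===== VERDICT (by name: the statement is the Claim_ definition above) =====
theorem reverse_transformation_spec : Claim_equal_reverse_transformation := by
  intro output _
  unfold Spec_reverse_transformation
  rw [show output = String.ofList output.toList from String.ofList_toList.symm, A_norm, B_norm]
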